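-- pv_equiv track=rewrite | github.com/saxonmahar/Ai-Resume-Analyzer | src/recommender/matcher.py | skill_gap_analysis
-- ===== SOURCE A (Python) =====
-- def skill_gap_analysis(resume_text, top_job_row):
--
--     # clean resume words better
--     resume_words = set(
--         word.strip().lower()
--         for word in resume_text.split()
--         if len(word) > 2
--     )
--
--     # clean job skills better
--     job_skills = str(top_job_row["required skills"]).lower()
--     job_skills = set(
--         skill.strip()
--         for skill in job_skills.split("|")
--         if skill.strip()
--     )
--
--     matched = resume_words.intersection(job_skills)
--     missing = job_skills - resume_words
--
--     return {
--         "matched_skills": sorted(list(matched)),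
--         "missing_skills": sorted(list(missing))
--     }
-- ===== SOURCE B (Python) =====
-- def skill_gap_analysis(resume_text, top_job_row):
--     # Merge-based partition: sort both deduplicated word lists once, then walk the
--     # sorted job skills against the sorted resume words with an advancing pointer
--     # (two-pointer merge), so no hash-set membership test is done per skill.
--     resume = sorted({w.strip().lower() for w in resume_text.split() if len(w) > 2})
--     jobs = sorted({s.strip()
--                    for s in str(top_job_row["required skills"]).lower().split("|")
--                    if s.strip()})
--     matched, missing = [], []
--     i = 0
--     for s in jobs:
--         while i < len(resume) and resume[i] < s:
--             i += 1
--         if i < len(resume) and resume[i] == s: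
--             matched.append(s)
--         else:
--             missing.append(s)
--     return {"matched_skills": matched, "missing_skills": missing}
-- ===== Notes on version B (the rewrite author's own statement) =====
-- stated objective: alternative
-- what changed: B sorts both deduplicated word lists once and partitions the job skills by a two-pointer merge walk against the sorted resume words (exploiting sortedness, no per-skill hash membership test), instead of set intersection/difference followed by two sorts.
-- outside the precondition, e.g. on skill_gap_analysis('python java', {}): A raises KeyError, B raises KeyError
import Mathlib
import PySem

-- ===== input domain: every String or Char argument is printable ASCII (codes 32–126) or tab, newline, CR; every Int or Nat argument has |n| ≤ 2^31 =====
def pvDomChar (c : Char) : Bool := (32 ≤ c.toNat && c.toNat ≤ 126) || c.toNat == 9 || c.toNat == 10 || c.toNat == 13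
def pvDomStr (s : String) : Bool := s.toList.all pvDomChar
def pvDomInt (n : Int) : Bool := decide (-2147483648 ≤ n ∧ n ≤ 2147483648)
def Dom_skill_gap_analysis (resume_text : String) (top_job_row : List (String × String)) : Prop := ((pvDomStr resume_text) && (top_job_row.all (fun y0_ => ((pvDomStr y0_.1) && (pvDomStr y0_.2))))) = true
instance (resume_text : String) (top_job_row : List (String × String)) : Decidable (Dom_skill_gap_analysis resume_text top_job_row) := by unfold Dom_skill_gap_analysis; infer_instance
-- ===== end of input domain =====

-- B sorts both deduplicated word lists once and partitions the job skills by a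
-- two-pointer merge walk against the sorted resume words, instead of a set
-- intersection and a set difference each sorted separately (alternative, same cost).

-- ===== PORT A =====
def skill_gap_analysis (resume_text : String) (top_job_row : List (String × String)) : List (String × List String) :=
  let resume_words : PySem.Set String :=
    PySem.Set.ofList (((PySem.Str.split₀ resume_text).filter (fun w => 2 < PySem.Str.len w)).map
      (fun w => PySem.Str.lower (PySem.Str.strip w)))
  match (PySem.Dict.mk top_job_row).get? "required skills" with
  | none => []   -- KeyError in Python; excluded by Pre_
  | some v =>
    let job_skills : PySem.Set String :=
      PySem.Set.ofList ((((PySem.Str.split? (PySem.Str.lower v) "|").getD []).map PySem.Str.strip).filter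
        (fun s => s ≠ ""))  -- split? is some: the separator "|" is nonempty
    let matched := PySem.Set.inter resume_words job_skills
    let missing := PySem.Set.diff job_skills resume_words
    [("matched_skills", PySem.List.sorted matched (fun x => x) false),
     ("missing_skills", PySem.List.sorted missing (fun x => x) false)]

-- ===== PORT B =====
-- B's loop: walk the sorted job skills, advancing a pointer into the sorted resume
-- words ('while resume[i] < s: i += 1' = dropWhile), classifying each skill by the
-- element the pointer stops at.
def pvMergeWalk (resume : List String) (jobs : List String) : List String × List String :=
  match jobs with
  | [] => ([], [])
  | s :: rest =>
    let resume' := resume.dropWhile (fun r => decide (r < s))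
    let p := pvMergeWalk resume' rest
    if resume'.head? = some s then (s :: p.1, p.2) else (p.1, s :: p.2)

def skill_gap_analysis_alt (resume_text : String) (top_job_row : List (String × String)) : List (String × List String) :=
  let resume : List String :=
    PySem.List.sorted (PySem.Set.ofList (((PySem.Str.split₀ resume_text).filter
      (fun w => 2 < PySem.Str.len w)).map (fun w => PySem.Str.lower (PySem.Str.strip w))))
      (fun x => x) false
  match (PySem.Dict.mk top_job_row).get? "required skills" with
  | none => []   -- KeyError in Python; excluded by Pre_
  | some v =>
    let jobs : List String :=
      PySem.List.sorted (PySem.Set.ofList ((((PySem.Str.split? (PySem.Str.lower v) "|").getD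
        []).map PySem.Str.strip).filter (fun s => s ≠ ""))) (fun x => x) false
    let p := pvMergeWalk resume jobs
    [("matched_skills", p.1), ("missing_skills", p.2)]

-- ===== PRECONDITION & SPEC =====
-- A raises KeyError when "required skills" is not a key of top_job_row; Pre_ excludes exactly those inputs.
def Pre_skill_gap_analysis (_resume_text : String) (top_job_row : List (String × String)) : Prop :=
  (PySem.Dict.mk top_job_row).contains "required skills" = true
instance (resume_text : String) (top_job_row : List (String × String)) : Decidable (Pre_skill_gap_analysis resume_text top_job_row) := by unfold Pre_skill_gap_analysis; infer_instance

def pvWitness_skill_gap_analysis : String × (List (String × String)) :=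
  ("Python java  c++", [("required skills", "python | SQL|java")])

def Spec_skill_gap_analysis (resume_text : String) (top_job_row : List (String × String)) (out : List (String × List String)) : Prop := out = skill_gap_analysis_alt resume_text top_job_row
instance (resume_text : String) (top_job_row : List (String × String)) (out : List (String × List String)) : Decidable (Spec_skill_gap_analysis resume_text top_job_row out) := by unfold Spec_skill_gap_analysis; infer_instance

-- ===== CLAIM =====
def Claim_equal_skill_gap_analysis : Prop := ∀ (resume_text : String) (top_job_row : List (String × String)), Dom_skill_gap_analysis resume_text top_job_row → Pre_skill_gap_analysis resume_text top_job_row → Spec_skill_gap_analysis resume_text top_job_row (skill_gap_analysis resume_text top_job_row)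

-- ===== LEMMAS AND PROOFS =====

-- the pointer stops exactly on s iff s occurs in the (strictly sorted) resume list
theorem head_dropWhile_iff_mem (R : List String) (s : String) (hR : R.Pairwise (· < ·)) :
    (R.dropWhile (fun r => decide (r < s))).head? = some s ↔ s ∈ R := by
  constructor
  · intro h
    exact (List.dropWhile_sublist _).subset (List.mem_of_mem_head? h)
  · intro hs
    have hsplit := List.takeWhile_append_dropWhile (p := fun r => decide (r < s)) (l := R)
    have hsd : s ∈ R.dropWhile (fun r => decide (r < s)) := by
      rcases (by rw [← hsplit] at hs; exact List.mem_append.mp hs) with h | h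
      · have hss := List.mem_takeWhile_imp (p := fun r => decide (r < s)) h
        exact absurd (of_decide_eq_true hss) (lt_irrefl s)
      · exact h
    have hpd : (R.dropWhile (fun r => decide (r < s))).Pairwise (· < ·) :=
      hR.sublist (List.dropWhile_sublist _)
    cases hD : R.dropWhile (fun r => decide (r < s)) with
    | nil => rw [hD] at hsd; cases hsd
    | cons h t =>
      rw [hD] at hsd hpd
      have hhead : ¬ (h < s) := by
        have h2 := List.head?_dropWhile_not (p := fun r => decide (r < s)) (l := R)
        rw [hD] at h2
        simpa using h2
      rcases List.mem_cons.mp hsd with rfl | hst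
      · simp
      · exact absurd ((List.pairwise_cons.mp hpd).1 s hst) hhead

-- elements larger than s survive the pointer advance
theorem mem_dropWhile_of_gt (R : List String) (s j : String) (hsj : s < j) :
    j ∈ R.dropWhile (fun r => decide (r < s)) ↔ j ∈ R := by
  constructor
  · intro h; exact (List.dropWhile_sublist _).subset h
  · intro hj
    have hsplit := List.takeWhile_append_dropWhile (p := fun r => decide (r < s)) (l := R)
    rcases (by rw [← hsplit] at hj; exact List.mem_append.mp hj) with h | h
    · have hjs := List.mem_takeWhile_imp (p := fun r => decide (r < s)) h
      exact absurd (lt_trans (of_decide_eq_true hjs) hsj) (lt_irrefl j)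
    · exact h

-- the merge walk over strictly sorted lists is the membership partition of jobs
theorem pvMergeWalk_eq_partition :
    ∀ (J R : List String), J.Pairwise (· < ·) → R.Pairwise (· < ·) →
      pvMergeWalk R J = (J.filter (fun j => decide (j ∈ R)), J.filter (fun j => !decide (j ∈ R))) := by
  intro J
  induction J with
  | nil => intro R _ _; simp [pvMergeWalk]
  | cons s rest ih =>
    intro R hJ hR
    have hJr := List.pairwise_cons.mp hJ
    have hR' : (R.dropWhile (fun r => decide (r < s))).Pairwise (· < ·) :=
      hR.sublist (List.dropWhile_sublist _)
    have hrec := ih (R.dropWhile (fun r => decide (r < s))) hJr.2 hR'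
    have hfilt : ∀ (b : Bool),
        rest.filter (fun j => (decide (j ∈ R.dropWhile (fun r => decide (r < s)))) == b)
          = rest.filter (fun j => (decide (j ∈ R)) == b) := by
      intro b
      apply List.filter_congr
      intro j hj
      rw [decide_eq_decide.mpr (mem_dropWhile_of_gt R s j (hJr.1 j hj))]
    have hf1 : rest.filter (fun j => decide (j ∈ R.dropWhile (fun r => decide (r < s))))
        = rest.filter (fun j => decide (j ∈ R)) := by
      have := hfilt true; simpa using this
    have hf2 : rest.filter (fun j => !decide (j ∈ R.dropWhile (fun r => decide (r < s))))
        = rest.filter (fun j => !decide (j ∈ R)) := by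
      have := hfilt false; simpa using this
    by_cases hs : s ∈ R
    · have hh : (R.dropWhile (fun r => decide (r < s))).head? = some s :=
        (head_dropWhile_iff_mem R s hR).mpr hs
      simp only [pvMergeWalk, hrec, if_pos hh, hf1, hf2, List.filter_cons, hs, decide_true,
        Bool.not_true, if_true]
      simp
    · have hh : ¬ (R.dropWhile (fun r => decide (r < s))).head? = some s := by
        intro h; exact hs ((head_dropWhile_iff_mem R s hR).mp h)
      simp only [pvMergeWalk, hrec, if_neg hh, hf1, hf2]
      simp [hs]

-- sorting a subset of a deduplicated set = filtering the sorted set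
theorem sorted_eq_filter_sorted (xs : List String) (m : List String) (p : String → Bool)
    (hnd : m.Nodup) (hmem : ∀ x, x ∈ m ↔ x ∈ PySem.Set.ofList xs ∧ p x = true) :
    PySem.List.sorted m (fun x => x) false
      = (PySem.List.sorted (PySem.Set.ofList xs) (fun x => x) false).filter p := by
  apply PySem.List.sorted_eq_of_perm_of_pairwise_lt
  · refine (List.perm_ext_iff_of_nodup ?_ hnd).2 ?_
    · exact List.Nodup.filter _
        (((PySem.List.sorted_perm (PySem.Set.ofList xs) _ _).nodup_iff).2 (PySem.Set.nodup_ofList xs))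
    · intro a
      simp only [List.mem_filter, PySem.List.mem_sorted, hmem]
  · exact List.Pairwise.filter _ (PySem.List.sorted_ofList_pairwise_lt xs)

theorem sorted_inter_eq (rs js : List String) :
    PySem.List.sorted (PySem.Set.inter (PySem.Set.ofList rs) (PySem.Set.ofList js)) (fun x => x) false
      = (PySem.List.sorted (PySem.Set.ofList js) (fun x => x) false).filter
          (fun s => decide (s ∈ PySem.List.sorted (PySem.Set.ofList rs) (fun x => x) false)) := by
  apply sorted_eq_filter_sorted
  · exact PySem.Set.nodup_inter _ _ (PySem.Set.nodup_ofList _)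
  · intro x
    simp only [PySem.Set.mem_inter, PySem.List.mem_sorted, decide_eq_true_eq]
    tauto

theorem sorted_diff_eq (rs js : List String) :
    PySem.List.sorted (PySem.Set.diff (PySem.Set.ofList js) (PySem.Set.ofList rs)) (fun x => x) false
      = (PySem.List.sorted (PySem.Set.ofList js) (fun x => x) false).filter
          (fun s => !decide (s ∈ PySem.List.sorted (PySem.Set.ofList rs) (fun x => x) false)) := by
  apply sorted_eq_filter_sorted
  · exact PySem.Set.nodup_diff _ _ (PySem.Set.nodup_ofList _)
  · intro x
    simp only [PySem.Set.mem_diff, PySem.List.mem_sorted, Bool.not_eq_eq_eq_not, Bool.not_true,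
      decide_eq_false_iff_not]

-- ===== VERDICT =====
theorem skill_gap_analysis_spec : Claim_equal_skill_gap_analysis := by
  intro resume_text top_job_row _ _
  unfold Spec_skill_gap_analysis skill_gap_analysis skill_gap_analysis_alt
  cases h : (PySem.Dict.mk top_job_row).get? "required skills" with
  | none => rfl
  | some v =>
    simp only [pvMergeWalk_eq_partition _ _ (PySem.List.sorted_ofList_pairwise_lt _)
      (PySem.List.sorted_ofList_pairwise_lt _), sorted_inter_eq, sorted_diff_eq]
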